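-- pv_equiv track=rewrite | github.com/f1tenth/f1tenth_gym | gym/f110_gym/envs/raceline.py | find_local_minima
-- ===== SOURCE A (Python) =====
-- def find_local_minima(distances):
--     """
--     Returns a list of indices corresponding to local minima.
--     For any local minimum plateau, returns the middle index (average index rounded down).
--
--     The signal is assumed to be circular.
--     """
--
--     if len(distances) == 0:
--         raise ValueError("The input signal is empty.")
--
--     n = len(distances)
--     minima_indices = []
--     i = 0
--
--     # Helper function to get circular index
--     circ = lambda idx: idx % n
--
--     # Iterate over each index
--     while i < n:
--         # Get current value and its two neighbors (circular)
--         prev_val = distances[circ(i - 1)]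
--         cur_val = distances[i]
--         next_val = distances[circ(i + 1)]
--
--         # If current value is distinctly lower than both neighbors, it's a local minimum
--         if cur_val < prev_val and cur_val < next_val:
--             minima_indices.append(i)
--             i += 1
--         # Check for a plateau: starts if current equals next and is lower than the neighbor before plateau and after plateau
--         elif cur_val == next_val:
--             # Identify the plateau segment. We'll scan forward while values are equal
--
--             # Move j pointer
--             j = i + 1
--             iters = 1 # n points in plateau
--             while j < i + n and distances[circ(j)] == cur_val:
--                 j += 1
--                 iters += 1
--
--             # Determine the "neighbors" of the plateau:
--             left_index = circ(i - 1)
--             right_index = circ(j)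
--             left_val = distances[left_index]
--             right_val = distances[right_index]
--
--             # Plateaus count as a local minimum if cur_val < both neighbors
--             if cur_val < left_val and cur_val < right_val:
--                 length = iters
--                 # Choose the middle: if even number of points, the formula picks the lower middle
--                 # We compute the logical middle index (mod n).
--                 mid_offset = (length - 1) // 2
--                 mid_index = circ(i + mid_offset)
--                 minima_indices.append(mid_index)
--             elif iters == n:
--                 # If the plateau spans the entire signal, you might either pick one index or ignore
--                 minima_indices.append(i)
--
--             # Skip the entire plateau region
--             i = j
--         else:
--             i += 1
--
--     return minima_indices
-- ===== SOURCE B (Python) =====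
-- def find_local_minima(distances):
--     """Runs-table re-implementation: build the maximal circular runs (their start
--     indices), then emit the middle of each run that is strictly below both
--     neighbouring runs."""
--     if len(distances) == 0:
--         raise ValueError("The input signal is empty.")
--     n = len(distances)
--     # start indices of maximal circular runs (index whose circular predecessor differs)
--     starts = [i for i in range(n) if distances[i] != distances[i - 1]]
--     if not starts:
--         # the whole circular signal is one constant run
--         return [0]
--     m = len(starts)
--     res = []
--     for k in range(m):
--         s = starts[k]
--         v = distances[s]
--         length = (starts[(k + 1) % m] - s) % n
--         if v < distances[starts[(k - 1) % m]] and v < distances[starts[(k + 1) % m]]: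
--             res.append((s + (length - 1) // 2) % n)
--     return res
-- ===== Notes on version B (the rewrite author's own statement) =====
-- stated objective: alternative
-- what changed: Replaces A's single circular scan with an inline skip-the-plateau inner while-loop by a two-pass runs decomposition: first collect the start indices of the maximal circular runs, then for each run compare its value against the two neighbouring runs and emit the run middle.
import Mathlib
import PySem

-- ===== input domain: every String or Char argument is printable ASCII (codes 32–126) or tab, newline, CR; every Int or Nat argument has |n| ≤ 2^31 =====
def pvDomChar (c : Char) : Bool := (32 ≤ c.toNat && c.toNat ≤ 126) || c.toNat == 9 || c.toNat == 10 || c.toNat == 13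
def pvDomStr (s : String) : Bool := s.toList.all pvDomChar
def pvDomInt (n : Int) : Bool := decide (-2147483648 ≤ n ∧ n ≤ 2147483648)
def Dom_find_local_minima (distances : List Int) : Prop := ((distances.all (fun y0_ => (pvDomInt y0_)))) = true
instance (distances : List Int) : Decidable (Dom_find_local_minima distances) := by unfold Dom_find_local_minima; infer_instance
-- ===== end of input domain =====

-- B replaces A's inline skip-the-plateau scan with a runs table (circular run start
-- indices found in one pass) and a per-run comparison pass; same return value on
-- every non-empty input (objective: alternative decomposition, similar cost).

-- ===== PORT A =====
-- distances[idx] (index always in range where A evaluates it on admitted inputs; default 0 unreachable)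
def pvAt (d : List Int) (i : Int) : Int := PySem.List.pyGetD d i 0

-- circ = lambda idx: idx % n, followed by indexing: distances[circ(idx)]
def pvCirc (d : List Int) (i : Int) : Int := pvAt d (PySem.Int.mod i (d.length : Int))

-- inner while: while j < i + n and distances[circ(j)] == cur_val: j += 1; iters += 1
-- (fuel-guarded structural recursion; fuel = len(distances) bounds the ≤ n-1 iterations)
def pvInnerA (d : List Int) (cur : Int) (i : Nat) : Nat → Nat → Nat → Nat × Nat
  | 0, j, iters => (j, iters)
  | fuel + 1, j, iters =>
    if j < i + d.length ∧ pvCirc d (j : Int) = cur then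
      pvInnerA d cur i fuel (j + 1) (iters + 1)
    else (j, iters)

-- outer while i < n loop of A (fuel = len(distances) bounds the number of iterations,
-- since i strictly increases each time round)
def pvLoopA (d : List Int) : Nat → Nat → List Int → List Int
  | 0, _, acc => acc
  | fuel + 1, i, acc =>
    if i < d.length then
      let prev := pvCirc d ((i : Int) - 1)
      let cur := pvAt d (i : Int)
      let next := pvCirc d ((i : Int) + 1)
      if cur < prev ∧ cur < next then
        pvLoopA d fuel (i + 1) (acc ++ [(i : Int)])
      else if cur = next then
        let ji := pvInnerA d cur i d.length (i + 1) 1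
        let left := pvCirc d ((i : Int) - 1)
        let right := pvCirc d (ji.1 : Int)
        let acc' :=
          if cur < left ∧ cur < right then
            acc ++ [PySem.Int.mod ((i : Int) + PySem.Int.floordiv ((ji.2 : Int) - 1) 2) (d.length : Int)]
          else if ji.2 = d.length then acc ++ [(i : Int)] else acc
        pvLoopA d fuel ji.1 acc'
      else pvLoopA d fuel (i + 1) acc
    else acc

-- the 'raise ValueError' on empty input is excluded by Pre_
def find_local_minima (distances : List Int) : List Int :=
  pvLoopA distances distances.length 0 []

-- ===== PORT B =====
def find_local_minima_alt (distances : List Int) : List Int :=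
  let n := distances.length
  let starts := (PySem.List.pyRange 0 (n : Int)).filter
    (fun i => pvAt distances i ≠ pvAt distances (i - 1))
  if starts = [] then [0]
  else
    let m := starts.length
    (PySem.List.pyRange 0 (m : Int)).foldl (fun res k =>
      let s := pvAt starts k
      let v := pvAt distances s
      let len := PySem.Int.mod (pvAt starts (PySem.Int.mod (k + 1) (m : Int)) - s) (n : Int)
      if v < pvAt distances (pvAt starts (PySem.Int.mod (k - 1) (m : Int))) ∧
         v < pvAt distances (pvAt starts (PySem.Int.mod (k + 1) (m : Int))) then
        res ++ [PySem.Int.mod (s + PySem.Int.floordiv (len - 1) 2) (n : Int)]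
      else res) []

-- ===== PRECONDITION & SPEC =====
-- A raises ValueError exactly on the empty list; Pre_ admits every other input.
def Pre_find_local_minima (distances : List Int) : Prop := distances ≠ []
instance (distances : List Int) : Decidable (Pre_find_local_minima distances) := by
  unfold Pre_find_local_minima; infer_instance

def pvWitness_find_local_minima : List Int := [3, 1, 1, 2]

def Spec_find_local_minima (distances : List Int) (out : List Int) : Prop := out = find_local_minima_alt distances
instance (distances : List Int) (out : List Int) : Decidable (Spec_find_local_minima distances out) := by unfold Spec_find_local_minima; infer_instance

-- ===== CLAIM (what is proved, stated in full; the proofs are below) =====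
def Claim_equal_find_local_minima : Prop := ∀ (distances : List Int), Dom_find_local_minima distances → Pre_find_local_minima distances → Spec_find_local_minima distances (find_local_minima distances)

-- ===== LEMMAS AND PROOFS =====

-- value at circular position k (k may exceed the length)
def pvVal (d : List Int) (k : Nat) : Int := d.getD (k % d.length) 0

-- t (< length) is the start of a maximal circular run
def pvStartP (d : List Int) (t : Nat) : Prop :=
  d.getD t 0 ≠ d.getD ((t + d.length - 1) % d.length) 0

-- the (sorted) list of run starts
def pvSS (d : List Int) : List Nat :=
  (List.range d.length).filter
    (fun t => decide (d.getD t 0 ≠ d.getD ((t + d.length - 1) % d.length) 0))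

def pvSAt (d : List Int) (k : Nat) : Nat := (pvSS d).getD k 0

-- linear length of run k (last run wraps to the first start)
def pvLk (d : List Int) (k : Nat) : Nat :=
  if k + 1 < (pvSS d).length then pvSAt d (k + 1) - pvSAt d k
  else d.length - pvSAt d k + pvSAt d 0

-- emission of a run with start s and linear length L
def pvEm (d : List Int) (s L : Nat) : List Int :=
  if d.getD s 0 < pvVal d (s + d.length - 1) ∧ d.getD s 0 < pvVal d (s + L)
  then [((((s + (L - 1) / 2) % d.length : Nat)) : Int)] else []

def pvEmk (d : List Int) (k : Nat) : List Int := pvEm d (pvSAt d k) (pvLk d k)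

-- emissions of runs k, k+1, …, m-1
def pvEms (d : List Int) (k : Nat) : List Int :=
  ((List.range (pvSS d).length).drop k).flatMap (pvEmk d)

-- bridge lemmas
theorem pvAt_nat (d : List Int) (k : Nat) : pvAt d (k : Int) = d.getD k 0 := by
  simp [pvAt, PySem.List.pyGetD_natCast]

theorem pvCirc_eq (d : List Int) (hn : 0 < d.length) (a : Int) (k : Nat)
    (h : a - (k : Int) = -(d.length : Int) ∨ a - (k : Int) = 0) : pvCirc d a = pvVal d k := by
  have hb : (0:Int) < (d.length : Int) := by exact_mod_cast hn
  unfold pvCirc pvVal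
  rw [PySem.Int.mod_eq_emod_of_pos hb]
  have hmm : a % (d.length:Int) = (k:Int) % (d.length:Int) := by
    rcases h with h | h
    · have ha : a = (k:Int) - (d.length:Int) := by omega
      rw [ha, Int.sub_emod, Int.emod_self, sub_zero, Int.emod_emod_of_dvd _ dvd_rfl]
    · have ha : a = (k:Int) := by omega
      rw [ha]
  rw [hmm]
  have : ((k:Int) % (d.length:Int)) = ((k % d.length : Nat) : Int) := by
    push_cast; rfl
  rw [this]
  exact pvAt_nat d (k % d.length)

theorem pvCirc_nat (d : List Int) (hn : 0 < d.length) (k : Nat) :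
    pvCirc d (k : Int) = pvVal d k := pvCirc_eq d hn _ k (Or.inr (by omega))

theorem pvCirc_next (d : List Int) (hn : 0 < d.length) (k : Nat) :
    pvCirc d ((k : Int) + 1) = pvVal d (k + 1) := pvCirc_eq d hn _ (k+1) (Or.inr (by push_cast; ring))

theorem pvCirc_prev (d : List Int) (hn : 0 < d.length) (k : Nat) :
    pvCirc d ((k : Int) - 1) = pvVal d (k + d.length - 1) :=
  pvCirc_eq d hn _ (k + d.length - 1) (Or.inl (by omega))

theorem pvVal_lt (d : List Int) (k : Nat) (h : k < d.length) : pvVal d k = d.getD k 0 := by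
  unfold pvVal; rw [Nat.mod_eq_of_lt h]

theorem pvPred_pos (n t : Nat) (h0 : 0 < t) (h : t < n) : (t + n - 1) % n = t - 1 := by
  have e : t + n - 1 = n + (t - 1) := by omega
  rw [e, Nat.add_mod_left, Nat.mod_eq_of_lt (by omega)]

theorem pvPred_zero (n : Nat) (h : 0 < n) : (0 + n - 1) % n = n - 1 := by
  rw [Nat.zero_add, Nat.mod_eq_of_lt (by omega)]

theorem pvLoopA_succ (d : List Int) (fuel i : Nat) (acc : List Int) :
    pvLoopA d (fuel + 1) i acc =
      if i < d.length then
        let prev := pvCirc d ((i : Int) - 1)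
        let cur := pvAt d (i : Int)
        let next := pvCirc d ((i : Int) + 1)
        if cur < prev ∧ cur < next then
          pvLoopA d fuel (i + 1) (acc ++ [(i : Int)])
        else if cur = next then
          let ji := pvInnerA d cur i d.length (i + 1) 1
          let left := pvCirc d ((i : Int) - 1)
          let right := pvCirc d (ji.1 : Int)
          let acc' :=
            if cur < left ∧ cur < right then
              acc ++ [PySem.Int.mod ((i : Int) + PySem.Int.floordiv ((ji.2 : Int) - 1) 2) (d.length : Int)]
            else if ji.2 = d.length then acc ++ [(i : Int)] else acc
          pvLoopA d fuel ji.1 acc'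
        else pvLoopA d fuel (i + 1) acc
      else acc := rfl

theorem pvLoopA_stop (d : List Int) (fuel i : Nat) (acc : List Int) (h : d.length ≤ i) :
    pvLoopA d fuel i acc = acc := by
  cases fuel with
  | zero => rfl
  | succ f => rw [pvLoopA_succ, if_neg (by omega)]

theorem pvInner_run (d : List Int) (hn : 0 < d.length) (s L : Nat)
    (hLn : L ≤ d.length - 1)
    (hconst : ∀ t, s < t → t < s + L → pvVal d t = d.getD s 0)
    (hend : pvVal d (s + L) ≠ d.getD s 0) :
    ∀ fuel j, s + 1 ≤ j → j ≤ s + L → s + L - j ≤ fuel →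
      pvInnerA d (d.getD s 0) s fuel j (j - s) = (s + L, L) := by
  intro fuel
  induction fuel with
  | zero =>
    intro j h1 h2 h3
    have hj : j = s + L := by omega
    subst hj
    show (s + L, s + L - s) = (s + L, L)
    simp
  | succ f ih =>
    intro j h1 h2 h3
    by_cases hj : j = s + L
    · subst hj
      show (if _ ∧ _ then _ else _) = _
      rw [if_neg]
      · simp
      · rintro ⟨-, hcv⟩
        exact hend (by rw [← pvCirc_nat d hn (s + L)]; exact hcv)
    · have hjl : j < s + L := by omega
      show (if _ ∧ _ then _ else _) = _
      rw [if_pos]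
      · have e : j - s + 1 = (j + 1) - s := by omega
        rw [e]
        exact ih (j + 1) (by omega) (by omega) (by omega)
      · constructor
        · omega
        · rw [pvCirc_nat d hn j]; exact hconst j (by omega) hjl

theorem pvStepA (d : List Int) (hn : 0 < d.length) (s L : Nat) (hs : s < d.length)
    (hL1 : 1 ≤ L) (hLn : L ≤ d.length - 1)
    (hconst : ∀ t, s < t → t < s + L → pvVal d t = d.getD s 0)
    (hend : pvVal d (s + L) ≠ d.getD s 0) (fuel : Nat) (acc : List Int) :
    pvLoopA d (fuel + 1) s acc = pvLoopA d fuel (s + L) (acc ++ pvEm d s L) := by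
  rw [pvLoopA_succ, if_pos hs]
  simp only [pvCirc_prev d hn s, pvCirc_next d hn s, pvAt_nat d s]
  by_cases hL : L = 1
  · subst hL
    by_cases hc : d.getD s 0 < pvVal d (s + d.length - 1) ∧ d.getD s 0 < pvVal d (s + 1)
    · rw [if_pos hc]
      unfold pvEm
      rw [if_pos hc]
      congr 2
      simp [Nat.mod_eq_of_lt hs]
    · rw [if_neg hc, if_neg (fun h => hend h.symm)]
      unfold pvEm
      rw [if_neg hc, List.append_nil]
  · have hL2 : 2 ≤ L := by omega
    have hnext : pvVal d (s + 1) = d.getD s 0 := hconst (s + 1) (by omega) (by omega)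
    rw [if_neg (fun h => absurd (hnext ▸ h.2) (lt_irrefl _)), if_pos hnext.symm]
    have hrun : pvInnerA d (d.getD s 0) s d.length (s + 1) 1 = (s + L, L) := by
      have := pvInner_run d hn s L hLn hconst hend d.length (s + 1) (by omega) (by omega) (by omega)
      simpa using this
    rw [hrun]
    simp only [pvCirc_nat d hn (s + L)]
    by_cases hc : d.getD s 0 < pvVal d (s + d.length - 1) ∧ d.getD s 0 < pvVal d (s + L)
    · rw [if_pos hc]
      unfold pvEm
      rw [if_pos hc]
      congr 2
      have e1 : ((L : Int) - 1) = ((L - 1 : Nat) : Int) := by omega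
      have e3 : PySem.Int.floordiv ((L - 1 : Nat) : Int) 2 = (((L - 1) / 2 : Nat) : Int) := by
        exact_mod_cast PySem.Int.floordiv_natCast (L - 1) 2
      rw [e1, e3]
      have e2 : ((s : Int) + ((L - 1) / 2 : Nat)) = ((s + (L - 1) / 2 : Nat) : Int) := by push_cast; ring
      rw [e2, PySem.Int.mod_natCast]
    · rw [if_neg hc, if_neg (by omega : ¬ L = d.length)]
      unfold pvEm
      rw [if_neg hc, List.append_nil]
theorem pv_mem_SS (d : List Int) (t : Nat) : t ∈ pvSS d ↔ t < d.length ∧ pvStartP d t := by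
  simp [pvSS, pvStartP, List.mem_filter, List.mem_range]

theorem pvSS_pairwise (d : List Int) : (pvSS d).Pairwise (· < ·) :=
  (List.pairwise_lt_range).filter _

theorem pvSAt_getElem (d : List Int) (k : Nat) (h : k < (pvSS d).length) :
    pvSAt d k = (pvSS d)[k] := by
  unfold pvSAt; exact List.getD_eq_getElem _ _ h

theorem pvSAt_facts (d : List Int) (k : Nat) (h : k < (pvSS d).length) :
    pvSAt d k < d.length ∧ pvStartP d (pvSAt d k) := by
  rw [← pv_mem_SS, pvSAt_getElem d k h]
  exact List.getElem_mem h

theorem pvSAt_mono (d : List Int) (i j : Nat) (hij : i < j) (hj : j < (pvSS d).length) :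
    pvSAt d i < pvSAt d j := by
  rw [pvSAt_getElem d i (lt_trans hij hj), pvSAt_getElem d j hj]
  exact List.pairwise_iff_getElem.mp (pvSS_pairwise d) i j _ hj hij

-- a start strictly between two consecutive starts (or outside all) cannot exist
theorem pvStart_index (d : List Int) (t : Nat) (ht : t < d.length) (hp : pvStartP d t) :
    ∃ j, ∃ _ : j < (pvSS d).length, pvSAt d j = t := by
  have : t ∈ pvSS d := (pv_mem_SS d t).mpr ⟨ht, hp⟩
  obtain ⟨j, hj, he⟩ := List.mem_iff_getElem.mp this
  refine ⟨j, hj, ?_⟩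
  rw [pvSAt_getElem d j hj]
  exact he

theorem pvNoStart_between (d : List Int) (k : Nat) (hk : k + 1 < (pvSS d).length)
    (t : Nat) (h1 : pvSAt d k < t) (h2 : t < pvSAt d (k + 1)) : ¬ pvStartP d t := by
  intro hp
  have ht : t < d.length := lt_trans h2 (pvSAt_facts d (k+1) hk).1
  obtain ⟨j, hj, he⟩ := pvStart_index d t ht hp
  rcases Nat.lt_or_ge j (k + 1) with hlt | hge
  · rcases Nat.lt_or_ge j k with h | h
    · exact absurd (he ▸ pvSAt_mono d j k h (by omega)) (by omega)
    · have : j = k := by omega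
      subst this; omega
  · rcases eq_or_lt_of_le hge with h | h
    · subst h; omega
    · exact absurd (he ▸ pvSAt_mono d (k+1) j h hj) (by omega)

theorem pvNoStart_low (d : List Int) (hm : 0 < (pvSS d).length)
    (t : Nat) (h2 : t < pvSAt d 0) : ¬ pvStartP d t := by
  intro hp
  have ht : t < d.length := lt_trans h2 (pvSAt_facts d 0 hm).1
  obtain ⟨j, hj, he⟩ := pvStart_index d t ht hp
  rcases Nat.eq_zero_or_pos j with h | h
  · subst h; omega
  · exact absurd (he ▸ pvSAt_mono d 0 j h hj) (by omega)

theorem pvNoStart_high (d : List Int) (hm : 0 < (pvSS d).length)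
    (t : Nat) (h1 : pvSAt d ((pvSS d).length - 1) < t) (h2 : t < d.length) : ¬ pvStartP d t := by
  intro hp
  obtain ⟨j, hj, he⟩ := pvStart_index d t h2 hp
  rcases Nat.lt_or_ge j ((pvSS d).length - 1) with h | h
  · exact absurd (he ▸ pvSAt_mono d j _ h (by omega)) (by omega)
  · have : j = (pvSS d).length - 1 := by omega
    subst this; omega

-- constancy inside a startless stretch
theorem pvConst (d : List Int) (_hn : 0 < d.length) :
    ∀ b a, a ≤ b → b < d.length → (∀ t, a < t → t ≤ b → ¬ pvStartP d t) →
      d.getD b 0 = d.getD a 0 := by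
  intro b
  induction b with
  | zero =>
    intro a h _ _
    have : a = 0 := by omega
    rw [this]
  | succ b ih =>
    intro a h hb hno
    rcases eq_or_lt_of_le h with he | hlt
    · rw [he]
    · have hnp := hno (b + 1) hlt (le_refl _)
      unfold pvStartP at hnp
      push Not at hnp
      rw [hnp, pvPred_pos d.length (b+1) (by omega) hb]
      simpa using ih a (by omega) (by omega) (fun t h1 h2 => hno t h1 (by omega))
-- a circular signal cannot have exactly one run boundary
theorem pvSS_ne_one (d : List Int) (hn : 0 < d.length) : (pvSS d).length ≠ 1 := by
  intro hm
  set n := d.length with hnd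
  have h0 := pvSAt_facts d 0 (by omega)
  set s := pvSAt d 0 with hsd
  have huniq : ∀ t, t < n → pvStartP d t → t = s := by
    intro t ht hp
    obtain ⟨j, hj, he⟩ := pvStart_index d t ht hp
    have : j = 0 := by omega
    subst this; omega
  have key : ∀ k, k ≤ n - 1 → d.getD ((s + k) % n) 0 = d.getD s 0 := by
    intro k
    induction k with
    | zero => intro _; rw [Nat.add_zero, Nat.mod_eq_of_lt h0.1]
    | succ k ih =>
      intro hk
      set t := (s + (k + 1)) % n with htd
      have htn : t < n := Nat.mod_lt _ (by omega)
      have hts : t ≠ s := by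
        intro he
        have h1 : (s + (k + 1)) % n = s % n := by rw [← htd, he, Nat.mod_eq_of_lt h0.1]
        have h2 : n ∣ (s + (k + 1)) - s := (Nat.modEq_iff_dvd' (by omega)).mp h1.symm
        have h3 : n ∣ k + 1 := by simpa using h2
        have := Nat.le_of_dvd (by omega) h3
        omega
      have hnp : ¬ pvStartP d t := fun hp => hts (huniq t htn hp)
      unfold pvStartP at hnp
      push Not at hnp
      have e1 : (t + n - 1) % n = (s + k) % n := by
        have e : t + n - 1 = t + (n - 1) := by omega
        rw [e, htd, Nat.mod_add_mod]
        have e2 : s + (k + 1) + (n - 1) = s + k + n := by omega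
        rw [e2, Nat.add_mod_right]
      rw [hnp, e1]
      exact ih (by omega)
  have hcontra := h0.2
  unfold pvStartP at hcontra
  apply hcontra
  have e : s + d.length - 1 = s + (n - 1) := by omega
  rw [e, ← key (n - 1) (le_refl _)]

-- the all-equal (no boundary) case: inner scan runs a full lap
theorem pvInner_all (d : List Int) (hn : 0 < d.length)
    (hc : ∀ t, t < d.length → d.getD t 0 = d.getD 0 0) :
    ∀ fuel j, 1 ≤ j → j ≤ d.length → d.length - j ≤ fuel →
      pvInnerA d (d.getD 0 0) 0 fuel j j = (d.length, d.length) := by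
  intro fuel
  induction fuel with
  | zero =>
    intro j h1 h2 h3
    have : j = d.length := by omega
    subst this
    rfl
  | succ f ih =>
    intro j h1 h2 h3
    by_cases hj : j = d.length
    · subst hj
      show (if _ ∧ _ then _ else _) = _
      rw [if_neg (by omega)]
    · show (if _ ∧ _ then _ else _) = _
      rw [if_pos ⟨by omega, by
        rw [pvCirc_nat d hn j, pvVal_lt d j (by omega)]; exact hc j (by omega)⟩]
      exact ih (j + 1) (by omega) (by omega) (by omega)

theorem pvAllEq (d : List Int) (hn : 0 < d.length) (hss : pvSS d = []) :
    pvLoopA d d.length 0 [] = [(0 : Int)] := by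
  have hno : ∀ t, t < d.length → ¬ pvStartP d t := by
    intro t ht hp
    have : t ∈ pvSS d := (pv_mem_SS d t).mpr ⟨ht, hp⟩
    rw [hss] at this; exact absurd this (List.not_mem_nil)
  have hc : ∀ t, t < d.length → d.getD t 0 = d.getD 0 0 :=
    fun t ht => pvConst d hn t 0 (by omega) ht (fun u h1 h2 => hno u (by omega))
  have hprev : pvVal d (0 + d.length - 1) = d.getD 0 0 := by
    unfold pvVal
    rw [pvPred_zero d.length hn]
    exact hc (d.length - 1) (by omega)
  have hnext : pvVal d (0 + 1) = d.getD 0 0 := by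
    unfold pvVal
    exact hc (1 % d.length) (Nat.mod_lt _ hn)
  have ha0 := pvAt_nat d 0
  have hp0 := pvCirc_prev d hn 0
  have hq0 := pvCirc_next d hn 0
  have hrun := pvInner_all d hn hc d.length 1 (le_refl _) (by omega) (by omega)
  have hr : pvCirc d (d.length : Int) = d.getD 0 0 := by
    rw [pvCirc_nat d hn]; unfold pvVal; rw [Nat.mod_self]
  have efuel : d.length = (d.length - 1) + 1 := by omega
  rw [efuel, pvLoopA_succ, if_pos (by omega)]
  simp only [Nat.cast_zero] at ha0 hp0 hq0 ⊢
  rw [ha0, hp0, hq0, hprev, hnext]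
  rw [if_neg (fun h => lt_irrefl _ h.1), if_pos rfl, hrun]
  simp only
  rw [hr]
  rw [if_neg (fun h => lt_irrefl _ h.1)]
  rw [if_pos trivial, pvLoopA_stop d _ _ _ (le_refl _)]
  simp
theorem pvRunVal (d : List Int) (hn : 0 < d.length) (k : Nat) (hk : k + 1 < (pvSS d).length)
    (t : Nat) (h1 : pvSAt d k ≤ t) (h2 : t < pvSAt d (k + 1)) :
    d.getD t 0 = d.getD (pvSAt d k) 0 :=
  pvConst d hn t (pvSAt d k) h1 (lt_trans h2 (pvSAt_facts d (k+1) hk).1)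
    (fun u hu1 hu2 => pvNoStart_between d k hk u hu1 (by omega))

theorem pvLowVal (d : List Int) (hn : 0 < d.length) (hm : 0 < (pvSS d).length)
    (t : Nat) (h2 : t < pvSAt d 0) : d.getD t 0 = d.getD 0 0 :=
  pvConst d hn t 0 (by omega) (lt_trans h2 (pvSAt_facts d 0 hm).1)
    (fun u hu1 hu2 => pvNoStart_low d hm u (by omega))

theorem pvHighVal (d : List Int) (hn : 0 < d.length) (hm : 0 < (pvSS d).length)
    (t : Nat) (h1 : pvSAt d ((pvSS d).length - 1) ≤ t) (h2 : t < d.length) :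
    d.getD t 0 = d.getD (pvSAt d ((pvSS d).length - 1)) 0 :=
  pvConst d hn t _ h1 h2 (fun u hu1 hu2 => pvNoStart_high d hm u hu1 (by omega))

-- value of the wrapped tail of the last run
theorem pvLastVal (d : List Int) (hn : 0 < d.length) (hm : 0 < (pvSS d).length)
    (t : Nat) (h1 : d.length ≤ t) (h2 : t < d.length + pvSAt d 0) :
    pvVal d t = d.getD (pvSAt d ((pvSS d).length - 1)) 0 := by
  have hs0 : 0 < pvSAt d 0 := by omega
  have hs0n : pvSAt d 0 < d.length := (pvSAt_facts d 0 hm).1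
  have e1 : t % d.length = t - d.length := by
    have e : t = d.length + (t - d.length) := by omega
    conv_lhs => rw [e]
    rw [Nat.add_mod_left]
    exact Nat.mod_eq_of_lt (by omega)
  unfold pvVal
  rw [e1]
  have e2 : d.getD (t - d.length) 0 = d.getD 0 0 := by
    rcases Nat.eq_zero_or_pos (t - d.length) with h | h
    · rw [h]
    · exact pvLowVal d hn hm _ (by omega)
  have h0 : ¬ pvStartP d 0 := pvNoStart_low d hm 0 hs0
  unfold pvStartP at h0
  push Not at h0
  rw [pvPred_zero d.length hn] at h0
  rw [e2, h0]
  exact pvHighVal d hn hm (d.length - 1)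
    (by have := (pvSAt_facts d ((pvSS d).length - 1) (by omega)).1; omega) (by omega)

theorem pvEms_cons (d : List Int) (k : Nat) (hk : k < (pvSS d).length) :
    pvEms d k = pvEmk d k ++ pvEms d (k + 1) := by
  unfold pvEms
  rw [List.drop_eq_getElem_cons (by simpa using hk)]
  simp

theorem pvEms_end (d : List Int) : pvEms d (pvSS d).length = [] := by
  unfold pvEms
  rw [(by simp : ((List.range (pvSS d).length).drop (pvSS d).length) = [])]
  rfl

theorem pvChain (d : List Int) (hn : 0 < d.length) (hm : 2 ≤ (pvSS d).length) :
    ∀ fuel k, k < (pvSS d).length → (pvSS d).length - k ≤ fuel → ∀ acc,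
      pvLoopA d fuel (pvSAt d k) acc = acc ++ pvEms d k := by
  intro fuel
  induction fuel with
  | zero => intro k hk hf; omega
  | succ f ih =>
    intro k hk hf acc
    have hf1 := pvSAt_facts d k hk
    by_cases hkm : k + 1 < (pvSS d).length
    · have hLe : pvLk d k = pvSAt d (k+1) - pvSAt d k := by unfold pvLk; rw [if_pos hkm]
      have hmono := pvSAt_mono d k (k+1) (by omega) hkm
      have hf2 := pvSAt_facts d (k+1) hkm
      have hconst : ∀ t, pvSAt d k < t → t < pvSAt d k + pvLk d k →
          pvVal d t = d.getD (pvSAt d k) 0 := by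
        intro t ht1 ht2
        rw [hLe] at ht2
        have ht : t < pvSAt d (k+1) := by omega
        rw [pvVal_lt d t (lt_trans ht hf2.1)]
        exact pvRunVal d hn k hkm t (by omega) ht
      have hend : pvVal d (pvSAt d k + pvLk d k) ≠ d.getD (pvSAt d k) 0 := by
        have e : pvSAt d k + pvLk d k = pvSAt d (k+1) := by rw [hLe]; omega
        rw [e, pvVal_lt d _ hf2.1]
        have hsp := hf2.2
        unfold pvStartP at hsp
        rw [pvPred_pos d.length (pvSAt d (k+1)) (by omega) hf2.1] at hsp
        have : d.getD (pvSAt d (k+1) - 1) 0 = d.getD (pvSAt d k) 0 :=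
          pvRunVal d hn k hkm _ (by omega) (by omega)
        rw [this] at hsp
        exact hsp
      have hstep := pvStepA d hn (pvSAt d k) (pvLk d k) hf1.1 (by omega) (by omega)
        hconst hend f acc
      rw [hstep]
      have e : pvSAt d k + pvLk d k = pvSAt d (k+1) := by rw [hLe]; omega
      rw [e, ih (k+1) hkm (by omega)]
      rw [pvEms_cons d k hk, ← List.append_assoc]
      rfl
    · have hk1 : k = (pvSS d).length - 1 := by omega
      have hm0 : 0 < (pvSS d).length := by omega
      have hHigh : ∀ t, pvSAt d k ≤ t → t < d.length → d.getD t 0 = d.getD (pvSAt d k) 0 := by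
        intro t h1 h2
        rw [hk1] at h1 ⊢
        exact pvHighVal d hn hm0 t h1 h2
      have hLast : ∀ t, d.length ≤ t → t < d.length + pvSAt d 0 →
          pvVal d t = d.getD (pvSAt d k) 0 := by
        intro t h1 h2
        rw [hk1]
        exact pvLastVal d hn hm0 t h1 h2
      have hLe : pvLk d k = d.length - pvSAt d k + pvSAt d 0 := by
        unfold pvLk; rw [if_neg hkm]
      have hs0s : pvSAt d 0 < pvSAt d k := pvSAt_mono d 0 k (by omega) hk
      have hs0n : pvSAt d 0 < d.length := (pvSAt_facts d 0 hm0).1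
      have hconst : ∀ t, pvSAt d k < t → t < pvSAt d k + pvLk d k →
          pvVal d t = d.getD (pvSAt d k) 0 := by
        intro t ht1 ht2
        rw [hLe] at ht2
        rcases Nat.lt_or_ge t d.length with h | h
        · rw [pvVal_lt d t h]
          exact hHigh t (by omega) h
        · exact hLast t h (by have := hf1.1; omega)
      have hend : pvVal d (pvSAt d k + pvLk d k) ≠ d.getD (pvSAt d k) 0 := by
        have e : pvSAt d k + pvLk d k = d.length + pvSAt d 0 := by
          rw [hLe]; have := hf1.1; omega
        rw [e]
        have e2 : pvVal d (d.length + pvSAt d 0) = d.getD (pvSAt d 0) 0 := by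
          unfold pvVal
          rw [Nat.add_mod_left, Nat.mod_eq_of_lt hs0n]
        rw [e2]
        have hsp := (pvSAt_facts d 0 hm0).2
        unfold pvStartP at hsp
        rcases Nat.eq_zero_or_pos (pvSAt d 0) with h0 | h0
        · rw [h0] at hsp ⊢
          rw [pvPred_zero d.length hn] at hsp
          have e4 : d.getD (d.length - 1) 0 = d.getD (pvSAt d k) 0 :=
            hHigh (d.length - 1) (by have := hf1.1; omega) (by omega)
          rw [e4] at hsp
          exact hsp
        · rw [pvPred_pos d.length (pvSAt d 0) h0 hs0n] at hsp
          have e3 : d.getD (pvSAt d 0 - 1) 0 = d.getD 0 0 := by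
            rcases Nat.eq_zero_or_pos (pvSAt d 0 - 1) with h | h
            · rw [h]
            · exact pvLowVal d hn hm0 _ (by omega)
          have h0s : ¬ pvStartP d 0 := pvNoStart_low d hm0 0 h0
          unfold pvStartP at h0s
          push Not at h0s
          rw [pvPred_zero d.length hn] at h0s
          have e4 : d.getD (d.length - 1) 0 = d.getD (pvSAt d k) 0 :=
            hHigh (d.length - 1) (by have := hf1.1; omega) (by omega)
          rw [e3, h0s, e4] at hsp
          exact hsp
      have hstep := pvStepA d hn (pvSAt d k) (pvLk d k) hf1.1
        (by rw [hLe]; have := hf1.1; omega)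
        (by rw [hLe]; have := hf1.1; omega) hconst hend f acc
      rw [hstep, pvLoopA_stop d f _ _ (by rw [hLe]; have := hf1.1; omega)]
      rw [pvEms_cons d k hk]
      have he : pvEms d (k + 1) = [] := by
        have e5 : k + 1 = (pvSS d).length := by omega
        rw [e5, pvEms_end]
      rw [he, List.append_nil]
      rfl
-- the start list never outruns the signal
theorem pvSS_le (d : List Int) : (pvSS d).length ≤ d.length := by
  have := List.length_filter_le
    (fun t => decide (d.getD t 0 ≠ d.getD ((t + d.length - 1) % d.length) 0))
    (List.range d.length)
  simpa [pvSS] using this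

-- with no boundary at 0, there is strictly fewer than n starts
theorem pvSS_lt (d : List Int) (hn : 0 < d.length) (h0 : ¬ pvStartP d 0) :
    (pvSS d).length < d.length := by
  by_contra hle
  push Not at hle
  have hsub := List.filter_sublist (l := List.range d.length)
    (p := fun t => decide (d.getD t 0 ≠ d.getD ((t + d.length - 1) % d.length) 0))
  have heq : (List.range d.length).filter
      (fun t => decide (d.getD t 0 ≠ d.getD ((t + d.length - 1) % d.length) 0))
      = List.range d.length :=
    hsub.eq_of_length_le (by simpa [pvSS] using hle)
  have h0m : (0 : Nat) ∈ pvSS d := by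
    unfold pvSS
    rw [heq]
    simpa using hn
  exact h0 ((pv_mem_SS d 0).mp h0m).2

theorem pvAFull (d : List Int) (hn : 0 < d.length) (hm : 2 ≤ (pvSS d).length) :
    pvLoopA d d.length 0 [] = pvEms d 0 := by
  have hm0 : 0 < (pvSS d).length := by omega
  rcases Nat.eq_zero_or_pos (pvSAt d 0) with h0 | h0
  · have := pvChain d hn hm d.length 0 hm0 (by have := pvSS_le d; omega) []
    rw [h0] at this
    simpa using this
  · have hs0n : pvSAt d 0 < d.length := (pvSAt_facts d 0 hm0).1
    have hconst : ∀ t, 0 < t → t < 0 + pvSAt d 0 → pvVal d t = d.getD 0 0 := by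
      intro t ht1 ht2
      rw [pvVal_lt d t (by omega)]
      exact pvLowVal d hn hm0 t (by omega)
    have hend : pvVal d (0 + pvSAt d 0) ≠ d.getD 0 0 := by
      rw [Nat.zero_add, pvVal_lt d _ hs0n]
      have hsp := (pvSAt_facts d 0 hm0).2
      unfold pvStartP at hsp
      rw [pvPred_pos d.length (pvSAt d 0) h0 hs0n] at hsp
      have e3 : d.getD (pvSAt d 0 - 1) 0 = d.getD 0 0 := by
        rcases Nat.eq_zero_or_pos (pvSAt d 0 - 1) with h | h
        · rw [h]
        · exact pvLowVal d hn hm0 _ (by omega)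
      rw [e3] at hsp
      exact hsp
    have hstep := pvStepA d hn 0 (pvSAt d 0) hn h0 (by omega) hconst hend (d.length - 1) []
    have hem : pvEm d 0 (pvSAt d 0) = [] := by
      unfold pvEm
      rw [if_neg]
      rintro ⟨hlt, -⟩
      have h0s : ¬ pvStartP d 0 := pvNoStart_low d hm0 0 h0
      unfold pvStartP at h0s
      push Not at h0s
      rw [pvPred_zero d.length hn] at h0s
      rw [show pvVal d (0 + d.length - 1) = d.getD (d.length - 1) 0 by
        unfold pvVal; rw [pvPred_zero d.length hn]] at hlt
      rw [← h0s] at hlt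
      exact lt_irrefl _ hlt
    have hmlt : (pvSS d).length < d.length := pvSS_lt d hn (pvNoStart_low d hm0 0 h0)
    have efuel : d.length = (d.length - 1) + 1 := by omega
    rw [efuel, hstep, hem, List.append_nil, Nat.zero_add]
    exact pvChain d hn hm (d.length - 1) 0 hm0 (by omega) []
def pvStartsN (d : List Int) : List Int := List.map (fun t : Nat => ((t : Int))) (pvSS d)

theorem pvModCast (a : Int) (u n' : Nat) (hn : 0 < n') (hu : u < n')
    (h : a - (u : Int) = -(n' : Int) ∨ a - (u : Int) = 0) :
    PySem.Int.mod a (n' : Int) = (u : Int) := by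
  rw [PySem.Int.mod_eq_emod_of_pos (by exact_mod_cast hn)]
  rcases h with h | h
  · have ha : a = (u : Int) - (n' : Int) := by omega
    rw [ha, Int.sub_emod_right]
    exact Int.emod_eq_of_lt (by omega) (by exact_mod_cast hu)
  · have ha : a = (u : Int) := by omega
    rw [ha]
    exact Int.emod_eq_of_lt (by omega) (by exact_mod_cast hu)

theorem pvMidCast (s L n' : Nat) (hL : 1 ≤ L) :
    PySem.Int.mod ((s : Int) + PySem.Int.floordiv ((L : Int) - 1) 2) (n' : Int)
      = (((s + (L - 1) / 2) % n' : Nat) : Int) := by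
  have e1 : ((L : Int) - 1) = ((L - 1 : Nat) : Int) := by omega
  have e3 : PySem.Int.floordiv ((L - 1 : Nat) : Int) 2 = (((L - 1) / 2 : Nat) : Int) := by
    exact_mod_cast PySem.Int.floordiv_natCast (L - 1) 2
  rw [e1, e3]
  have e2 : ((s : Int) + (((L - 1) / 2 : Nat) : Int)) = ((s + (L - 1) / 2 : Nat) : Int) := by
    push_cast; ring
  rw [e2, PySem.Int.mod_natCast]

theorem pvAt_neg_one (d : List Int) (hn : 0 < d.length) :
    pvAt d (-1) = d.getD (d.length - 1) 0 := by
  unfold pvAt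
  simp only [PySem.List.pyGetD, PySem.List.pyGet?, PySem.List.pyIdx?]
  rw [if_neg (by omega), if_pos (by omega)]
  rw [List.getD_eq_getElem _ _ (by omega)]
  simp [hn]

-- B's run-start list is the Int image of pvSS
theorem pvStarts_eq (d : List Int) (hn : 0 < d.length) :
    ((PySem.List.pyRange 0 (d.length : Int)).filter
        (fun i => pvAt d i ≠ pvAt d (i - 1)))
      = pvStartsN d := by
  rw [PySem.List.pyRange_zero_natCast, List.filter_map]
  unfold pvStartsN pvSS
  apply congrArg (List.map (fun t : Nat => (t : Int)))
  apply List.filter_congr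
  intro t ht
  rw [List.mem_range] at ht
  simp only [Function.comp_apply]
  have hnum : pvAt d ((t : Int)) = d.getD t 0 := pvAt_nat d t
  have hprev : pvAt d ((t : Int) - 1) = d.getD ((t + d.length - 1) % d.length) 0 := by
    rcases Nat.eq_zero_or_pos t with h0 | h0
    · subst h0
      simp only [Nat.cast_zero, zero_sub]
      rw [pvAt_neg_one d hn, pvPred_zero d.length hn]
    · have e : (t : Int) - 1 = ((t - 1 : Nat) : Int) := by omega
      rw [e, pvAt_nat, pvPred_pos d.length t h0 ht]
  rw [hnum, hprev]

theorem pvStartsAt (d : List Int) (k : Nat) (hk : k < (pvSS d).length) :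
    pvAt (pvStartsN d) (k : Int) = ((pvSAt d k : Nat) : Int) := by
  unfold pvStartsN
  rw [pvAt_nat]
  rw [List.getD_eq_getElem _ _ (by simpa using hk)]
  rw [pvSAt_getElem d k hk, List.getElem_map]

theorem pvPrevRunVal (d : List Int) (hn : 0 < d.length) (hm : 2 ≤ (pvSS d).length)
    (k : Nat) (hk : k < (pvSS d).length) :
    pvVal d (pvSAt d k + d.length - 1)
      = d.getD (pvSAt d ((k + (pvSS d).length - 1) % (pvSS d).length)) 0 := by
  have hm0 : 0 < (pvSS d).length := by omega
  have hkn : pvSAt d k < d.length := (pvSAt_facts d k hk).1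
  rcases Nat.eq_zero_or_pos k with hk0 | hk0
  · subst hk0
    have e : (0 + (pvSS d).length - 1) % (pvSS d).length = (pvSS d).length - 1 := by
      rw [Nat.zero_add]; exact Nat.mod_eq_of_lt (by omega)
    rw [e]
    have hlast : pvSAt d ((pvSS d).length - 1) < d.length := (pvSAt_facts d _ (by omega)).1
    rcases Nat.eq_zero_or_pos (pvSAt d 0) with h0 | h0
    · rw [h0]
      unfold pvVal
      rw [pvPred_zero d.length hn]
      exact pvHighVal d hn hm0 (d.length - 1) (by omega) (by omega)
    · unfold pvVal
      rw [pvPred_pos d.length (pvSAt d 0) h0 hkn]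
      have e3 : d.getD (pvSAt d 0 - 1) 0 = d.getD 0 0 := by
        rcases Nat.eq_zero_or_pos (pvSAt d 0 - 1) with h | h
        · rw [h]
        · exact pvLowVal d hn hm0 _ (by omega)
      have h0s : ¬ pvStartP d 0 := pvNoStart_low d hm0 0 h0
      unfold pvStartP at h0s
      push Not at h0s
      rw [pvPred_zero d.length hn] at h0s
      rw [e3, h0s]
      exact pvHighVal d hn hm0 (d.length - 1) (by omega) (by omega)
  · have e : (k + (pvSS d).length - 1) % (pvSS d).length = k - 1 := by
      have e2 : k + (pvSS d).length - 1 = (pvSS d).length + (k - 1) := by omega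
      rw [e2, Nat.add_mod_left]
      exact Nat.mod_eq_of_lt (by omega)
    rw [e]
    have hmono := pvSAt_mono d (k - 1) k (by omega) hk
    unfold pvVal
    rw [pvPred_pos d.length (pvSAt d k) (by omega) hkn]
    have ek : k - 1 + 1 = k := by omega
    exact pvRunVal d hn (k - 1) (by omega) (pvSAt d k - 1)
      (by omega) (by rw [ek]; omega)

theorem pvNextRunVal (d : List Int) (_hn : 0 < d.length) (hm : 2 ≤ (pvSS d).length)
    (k : Nat) (hk : k < (pvSS d).length) :
    pvVal d (pvSAt d k + pvLk d k) = d.getD (pvSAt d ((k + 1) % (pvSS d).length)) 0 := by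
  have hm0 : 0 < (pvSS d).length := by omega
  by_cases hkm : k + 1 < (pvSS d).length
  · rw [Nat.mod_eq_of_lt hkm]
    have e : pvSAt d k + pvLk d k = pvSAt d (k + 1) := by
      unfold pvLk
      rw [if_pos hkm]
      have := pvSAt_mono d k (k+1) (by omega) hkm
      omega
    rw [e, pvVal_lt d _ (pvSAt_facts d (k+1) hkm).1]
  · have hk1 : k + 1 = (pvSS d).length := by omega
    rw [hk1, Nat.mod_self]
    have hs0n : pvSAt d 0 < d.length := (pvSAt_facts d 0 hm0).1
    have e : pvSAt d k + pvLk d k = d.length + pvSAt d 0 := by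
      unfold pvLk
      rw [if_neg hkm]
      have := (pvSAt_facts d k hk).1
      omega
    rw [e]
    unfold pvVal
    rw [Nat.add_mod_left, Nat.mod_eq_of_lt hs0n]
-- foldl of a conditional append, Prop-conditioned, as a flatMap
theorem pvFoldlIf {α : Type} (l : List α) (C : α → Prop) [DecidablePred C]
    (f : α → Int) (acc : List Int) :
    l.foldl (fun res k => if C k then res ++ [f k] else res) acc
      = acc ++ l.flatMap (fun k => if C k then [f k] else []) := by
  induction l generalizing acc with
  | nil => simp
  | cons a l ih => by_cases h : C a <;> simp [h, ih]

theorem pvBmain (d : List Int) (hn : 0 < d.length) (hm2 : 2 ≤ (pvSS d).length) :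
    find_local_minima_alt d = pvEms d 0 := by
  unfold find_local_minima_alt
  dsimp only
  rw [pvStarts_eq d hn]
  have hlen : (pvStartsN d).length = (pvSS d).length := by simp [pvStartsN]
  rw [if_neg (by
    intro h
    have : (pvStartsN d).length = 0 := by rw [h]; rfl
    omega)]
  rw [hlen, PySem.List.pyRange_zero_natCast, pvFoldlIf, List.flatMap_map, List.nil_append]
  unfold pvEms
  rw [List.drop_zero]
  apply List.flatMap_congr
  intro k hk
  rw [List.mem_range] at hk
  have hm0 : 0 < (pvSS d).length := by omega
  have hsk : pvSAt d k < d.length := (pvSAt_facts d k hk).1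
  -- bridge the three starts lookups
  have b0 : pvAt (pvStartsN d) (k : Int) = ((pvSAt d k : Nat) : Int) := pvStartsAt d k hk
  have bnextIdx : PySem.Int.mod ((k : Int) + 1) ((pvSS d).length : Int)
      = (((k + 1) % (pvSS d).length : Nat) : Int) := by
    have e : ((k : Int) + 1) = ((k + 1 : Nat) : Int) := by push_cast; ring
    rw [e, PySem.Int.mod_natCast]
  have bprevIdx : PySem.Int.mod ((k : Int) - 1) ((pvSS d).length : Int)
      = (((k + (pvSS d).length - 1) % (pvSS d).length : Nat) : Int) :=
    pvModCast _ _ _ hm0 (Nat.mod_lt _ hm0) (by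
      rcases Nat.eq_zero_or_pos k with h | h
      · left
        subst h
        rw [Nat.zero_add, Nat.mod_eq_of_lt (by omega)]
        omega
      · right
        have e2 : k + (pvSS d).length - 1 = (pvSS d).length + (k - 1) := by omega
        rw [e2, Nat.add_mod_left, Nat.mod_eq_of_lt (by omega)]
        omega)
  have bnext : pvAt (pvStartsN d) (((k + 1) % (pvSS d).length : Nat) : Int)
      = ((pvSAt d ((k + 1) % (pvSS d).length) : Nat) : Int) :=
    pvStartsAt d _ (Nat.mod_lt _ hm0)
  have bprev : pvAt (pvStartsN d) (((k + (pvSS d).length - 1) % (pvSS d).length : Nat) : Int)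
      = ((pvSAt d ((k + (pvSS d).length - 1) % (pvSS d).length) : Nat) : Int) :=
    pvStartsAt d _ (Nat.mod_lt _ hm0)
  have bLk : PySem.Int.mod (((pvSAt d ((k + 1) % (pvSS d).length) : Nat) : Int)
        - ((pvSAt d k : Nat) : Int)) (d.length : Int) = ((pvLk d k : Nat) : Int) := by
    apply pvModCast _ _ _ hn
    · unfold pvLk
      split_ifs with h
      · have := pvSAt_mono d k (k+1) (by omega) h
        have := (pvSAt_facts d (k+1) h).1
        omega
      · have := pvSAt_mono d 0 k (by omega) hk
        omega
    · by_cases h : k + 1 < (pvSS d).length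
      · right
        unfold pvLk
        rw [if_pos h, Nat.mod_eq_of_lt h]
        have := pvSAt_mono d k (k+1) (by omega) h
        omega
      · left
        unfold pvLk
        rw [if_neg h, (by omega : k + 1 = (pvSS d).length), Nat.mod_self]
        have := pvSAt_mono d 0 k (by omega) hk
        omega
  have hL1 : 1 ≤ pvLk d k := by
    unfold pvLk
    split_ifs with h
    · have := pvSAt_mono d k (k+1) (by omega) h
      omega
    · omega
  simp only [b0, bnextIdx, bprevIdx, bnext, bprev, bLk, pvAt_nat]
  rw [pvMidCast _ _ _ hL1]
  unfold pvEmk pvEm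
  rw [pvPrevRunVal d hn hm2 k hk, pvNextRunVal d hn hm2 k hk]
theorem pvBempty (d : List Int) (hn : 0 < d.length) (hss : pvSS d = []) :
    find_local_minima_alt d = [0] := by
  unfold find_local_minima_alt
  dsimp only
  rw [pvStarts_eq d hn, if_pos (by unfold pvStartsN; rw [hss]; rfl)]

-- ===== VERDICT (by name: the statement is the Claim_ definition above) =====
theorem find_local_minima_spec : Claim_equal_find_local_minima := by
  intro d _ hpre
  have hne : d ≠ [] := hpre
  have hn : 0 < d.length := List.length_pos_of_ne_nil hne
  unfold Spec_find_local_minima find_local_minima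
  by_cases hss : pvSS d = []
  · rw [pvAllEq d hn hss, pvBempty d hn hss]
  · have hm1 : (pvSS d).length ≠ 0 := fun h => hss (List.eq_nil_of_length_eq_zero h)
    have hm2 : 2 ≤ (pvSS d).length := by have := pvSS_ne_one d hn; omega
    rw [pvAFull d hn hm2, pvBmain d hn hm2]
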